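-- pv_equiv track=rewrite | github.com/XinnuoXu/AggGen | src/prepro/data_pretrain.py | tokenize_alignment
-- ===== SOURCE A (Python) =====
-- def tokenize_alignment(src_subtokens, alignment):
--     new_alignment = []
--     for j in range(len(alignment)):
--         alg = []; idx = 0
--         for i, tok in enumerate(src_subtokens):
--             if tok.startswith("##") and tok != "##":
--                 alg.append(alg[-1])
--             else:
--                 alg.append(alignment[j][idx])
--                 idx += 1
--         new_alignment.append(alg)
--     return new_alignment
-- ===== SOURCE B (Python) =====
-- def tokenize_alignment(src_subtokens, alignment):
--     if not alignment:
--         return []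
--     # one pass: per-subtoken word index via a single running counter
--     word_id = -1
--     cols = []
--     for tok in src_subtokens:
--         if not (tok.startswith("##") and tok != "##"):
--             word_id += 1
--         cols.append(word_id)
--     return [[row[c] for c in cols] for row in alignment]
-- ===== Notes on version B (the rewrite author's own statement) =====
-- stated objective: alternative
-- what changed: B replaces A's per-row rescan of the continuation pattern (with alg[-1] self-reference and an idx/append pair) by one pass that assigns each subtoken a word index from a single running counter, then gathers every alignment row through that precomputed index map.
import Mathlib
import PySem

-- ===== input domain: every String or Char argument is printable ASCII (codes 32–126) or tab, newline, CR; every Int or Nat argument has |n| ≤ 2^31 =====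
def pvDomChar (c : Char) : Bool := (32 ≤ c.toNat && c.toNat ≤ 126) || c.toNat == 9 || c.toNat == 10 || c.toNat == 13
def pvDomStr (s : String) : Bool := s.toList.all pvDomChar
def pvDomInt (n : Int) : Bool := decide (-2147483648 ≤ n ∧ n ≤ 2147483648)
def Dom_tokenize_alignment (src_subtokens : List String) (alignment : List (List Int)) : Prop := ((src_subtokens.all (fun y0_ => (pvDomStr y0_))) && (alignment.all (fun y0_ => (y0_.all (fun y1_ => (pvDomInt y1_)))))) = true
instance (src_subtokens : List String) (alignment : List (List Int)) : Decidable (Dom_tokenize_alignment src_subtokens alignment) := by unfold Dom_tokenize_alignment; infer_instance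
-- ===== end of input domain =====

-- B precomputes a per-subtoken word-index map with one running counter and gathers each
-- alignment row through it, instead of A re-scanning the continuation pattern for every row.


-- shared by both ports: Python 'tok.startswith("##") and tok != "##"'
def pvIsCont (tok : String) : Bool := PySem.Str.startswith tok "##" && !(tok == "##")

-- ===== PORT A =====
def tokenize_alignment (src_subtokens : List String) (alignment : List (List Int)) : List (List Int) :=
  (PySem.List.pyRange 0 (alignment.length : Int) 1).foldl (fun new_alignment j =>
    let st := src_subtokens.foldl (fun (st : List Int × Int) tok =>
      if pvIsCont tok then
        (st.1 ++ [PySem.List.pyGetD st.1 (-1) 0], st.2)          -- alg.append(alg[-1]); IndexError excluded by Pre_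
      else
        (st.1 ++ [PySem.List.pyGetD (PySem.List.pyGetD alignment j []) st.2 0], st.2 + 1)  -- alignment[j][idx]; in range under Pre_
      ) ([], (0 : Int))
    new_alignment ++ [st.1]) []

-- ===== PORT B =====
def tokenize_alignment_alt (src_subtokens : List String) (alignment : List (List Int)) : List (List Int) :=
  if alignment = [] then []
  else
    -- 'word_id += 1' when not a continuation; 'cols.append(word_id)'
    let cols := (src_subtokens.foldl (fun (st : List Int × Int) tok =>
      let w := if pvIsCont tok then st.2 else st.2 + 1
      (st.1 ++ [w], w)) ([], (-1 : Int))).1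
    alignment.map (fun row => cols.map (fun c => PySem.List.pyGetD row c 0))

-- ===== PRECONDITION & SPEC =====
-- Pre_ excludes exactly the inputs where Python A raises IndexError: with a nonempty alignment,
-- a leading continuation subtoken ('alg[-1]' on empty alg), or a row shorter than the number of
-- non-continuation subtokens ('alignment[j][idx]' out of range).
def Pre_tokenize_alignment (src_subtokens : List String) (alignment : List (List Int)) : Prop :=
  alignment = [] ∨
    ((∀ t, src_subtokens.head? = some t → pvIsCont t = false) ∧
     ∀ row ∈ alignment, src_subtokens.countP (fun t => !(pvIsCont t)) ≤ row.length)
instance (src_subtokens : List String) (alignment : List (List Int)) : Decidable (Pre_tokenize_alignment src_subtokens alignment) := by unfold Pre_tokenize_alignment; infer_instance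
def pvWitness_tokenize_alignment : List String × List (List Int) := (["a", "##b", "c"], [[1, 2], [3, 4]])

def Spec_tokenize_alignment (src_subtokens : List String) (alignment : List (List Int)) (out : List (List Int)) : Prop := out = tokenize_alignment_alt src_subtokens alignment
instance (src_subtokens : List String) (alignment : List (List Int)) (out : List (List Int)) : Decidable (Spec_tokenize_alignment src_subtokens alignment out) := by unfold Spec_tokenize_alignment; infer_instance

-- ===== CLAIM (what is proved, stated in full; the proofs are below) =====
def Claim_equal_tokenize_alignment : Prop := ∀ (src_subtokens : List String) (alignment : List (List Int)), Dom_tokenize_alignment src_subtokens alignment → Pre_tokenize_alignment src_subtokens alignment → Spec_tokenize_alignment src_subtokens alignment (tokenize_alignment src_subtokens alignment)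

-- ===== LEMMAS AND PROOFS =====

-- Lock-step invariant between A's inner fold and B's counter fold: if A's accumulator is the
-- row-gather of B's cols, B's cols ends in c, and A's idx is c + 1, the folds stay aligned.
theorem pv_inner_eq (row : List Int) (toks : List String) :
    ∀ (l : List Int) (c : Int),
    (toks.foldl (fun (st : List Int × Int) tok =>
      if pvIsCont tok then (st.1 ++ [PySem.List.pyGetD st.1 (-1) 0], st.2)
      else (st.1 ++ [PySem.List.pyGetD row st.2 0], st.2 + 1))
      ((l ++ [c]).map (fun c => PySem.List.pyGetD row c 0), c + 1)).1
    = ((toks.foldl (fun (st : List Int × Int) tok =>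
        let w := if pvIsCont tok then st.2 else st.2 + 1
        (st.1 ++ [w], w)) (l ++ [c], c)).1).map
        (fun c => PySem.List.pyGetD row c 0) := by
  induction toks with
  | nil => intro l c; simp
  | cons t ts ih =>
    intro l c
    by_cases hc : pvIsCont t
    · simp only [List.foldl_cons, hc, if_pos]
      have h1 : PySem.List.pyGetD ((l ++ [c]).map (fun c => PySem.List.pyGetD row c 0)) (-1) 0
          = PySem.List.pyGetD row c 0 := by
        simp [PySem.List.pyGetD_neg_one_append_singleton]
      rw [h1]
      have := ih (l ++ [c]) c
      simpa [List.map_append] using this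
    · simp only [List.foldl_cons, hc, Bool.false_eq_true, if_neg, not_false_iff]
      have := ih (l ++ [c]) (c + 1)
      simpa [List.map_append] using this

-- Per-row: under the head condition, A's row for 'row' is B's cols gathered through 'row'.
theorem pv_row_eq (row : List Int) (toks : List String)
    (hhead : ∀ t, toks.head? = some t → pvIsCont t = false) :
    (toks.foldl (fun (st : List Int × Int) tok =>
      if pvIsCont tok then (st.1 ++ [PySem.List.pyGetD st.1 (-1) 0], st.2)
      else (st.1 ++ [PySem.List.pyGetD row st.2 0], st.2 + 1)) ([], (0 : Int))).1
    = ((toks.foldl (fun (st : List Int × Int) tok =>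
        let w := if pvIsCont tok then st.2 else st.2 + 1
        (st.1 ++ [w], w)) ([], (-1 : Int))).1).map
        (fun c => PySem.List.pyGetD row c 0) := by
  cases toks with
  | nil => simp
  | cons t ts =>
    have hc : pvIsCont t = false := hhead t rfl
    simp only [List.foldl_cons, hc, Bool.false_eq_true, if_neg, not_false_iff, List.nil_append]
    have := pv_inner_eq row ts [] 0
    simpa using this

-- ===== VERDICT (by name: the statement is the Claim_ definition above) =====
theorem tokenize_alignment_spec : Claim_equal_tokenize_alignment := by
  intro s a _ hpre
  show tokenize_alignment s a = tokenize_alignment_alt s a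
  rcases hpre with rfl | ⟨hhead, _⟩
  · simp [tokenize_alignment, tokenize_alignment_alt, PySem.List.pyRange]
  · unfold tokenize_alignment tokenize_alignment_alt
    rw [PySem.List.foldl_pyRange_zero_pyGetD' a ([] : List Int)
      (fun acc row => acc ++ [(s.foldl (fun (st : List Int × Int) tok =>
        if pvIsCont tok then (st.1 ++ [PySem.List.pyGetD st.1 (-1) 0], st.2)
        else (st.1 ++ [PySem.List.pyGetD row st.2 0], st.2 + 1)) ([], (0 : Int))).1]) []]
    rw [PySem.List.foldl_append_singleton_eq_map]
    by_cases ha : a = []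
    · simp [ha]
    · rw [if_neg ha]
      simp only [List.nil_append]
      exact List.map_congr_left (fun row _ => pv_row_eq row s hhead)
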